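-- pv_equiv track=rewrite | github.com/ihanwen99/SEFRQO | src/local_llm/utils/translation_nl_2_hint.py | generate_sql_hint
-- ===== SOURCE A (Python) =====
-- def extract_tables_from_expression(expression):
--     """Extract tables from the leading join expression in order"""
--     # Remove outermost parentheses
--     expression = expression.strip()
--     if expression.startswith('(') and expression.endswith(')'):
--         expression = expression[1:-1]
--     # Initialize a stack and list to store tables
--     stack = []
--     table_list = []
--     i = 0
--     while i < len(expression):
--         if expression[i] == '(':
--             stack.append('(')
--             i += 1
--         elif expression[i] == ')':
--             if stack and stack[-1] == '(':
--                 stack.pop()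
--             i += 1
--         elif expression[i].isspace():
--             i += 1
--         else:
--             # Read a table name
--             start = i
--             while i < len(expression) and not expression[i].isspace() and expression[i] != '(' and expression[i] != ')':
--                 i += 1
--             table = expression[start:i]
--             table_list.append(table)
--     return table_list
--
-- def generate_sql_hint(joins, scans_dict, leading_join_expression):
--     """Generate SQL hint from parsed joins and scans"""
--     hint_parts = []
--
--     # Reverse the joins to match the desired output order
--     joins.reverse()
--     # Add all joins
--     hint_parts.extend(joins)
--
--     # Extract tables from the leading_join_expression
--     table_list = extract_tables_from_expression(leading_join_expression)
--
--     # Reorder scans according to the order of tables in table_list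
--     scans = [scans_dict[table] for table in table_list if table in scans_dict]
--
--     # Add all scans
--     hint_parts.extend(scans)
--
--     # Add Leading hint with the final join structure
--     if leading_join_expression:
--         hint_parts.append(f"Leading{leading_join_expression}")
--
--     # Combine all hints
--     return "/*+ " + "\n".join(hint_parts) + " */"
-- ===== SOURCE B (Python) =====
-- def generate_sql_hint(joins, scans_dict, leading_join_expression):
--     """Generate SQL hint from parsed joins and scans"""
--     # Same in-place reversal of the caller's list as the original.
--     joins.reverse()
--     # Tokenize: parentheses act exactly like whitespace for the scanner,
--     # so turn them into spaces and let str.split() do the work.  The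
--     # original's strip()/outer-paren removal and its bracket stack do not
--     # affect the resulting token list, so they are dropped.
--     table_list = ''.join(' ' if c in '()' else c for c in leading_join_expression).split()
--     parts = joins + [scans_dict[t] for t in table_list if t in scans_dict]
--     if leading_join_expression:
--         parts.append("Leading" + leading_join_expression)
--     return "/*+ " + "\n".join(parts) + " */"
-- ===== Notes on version B (the rewrite author's own statement) =====
-- stated objective: simpler
-- what changed: extract_tables_from_expression's strip/outer-paren removal, explicit bracket stack (dead code) and char-by-char index loop are replaced by mapping parentheses to spaces and using str.split(), inlined into generate_sql_hint.
import Mathlib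
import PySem

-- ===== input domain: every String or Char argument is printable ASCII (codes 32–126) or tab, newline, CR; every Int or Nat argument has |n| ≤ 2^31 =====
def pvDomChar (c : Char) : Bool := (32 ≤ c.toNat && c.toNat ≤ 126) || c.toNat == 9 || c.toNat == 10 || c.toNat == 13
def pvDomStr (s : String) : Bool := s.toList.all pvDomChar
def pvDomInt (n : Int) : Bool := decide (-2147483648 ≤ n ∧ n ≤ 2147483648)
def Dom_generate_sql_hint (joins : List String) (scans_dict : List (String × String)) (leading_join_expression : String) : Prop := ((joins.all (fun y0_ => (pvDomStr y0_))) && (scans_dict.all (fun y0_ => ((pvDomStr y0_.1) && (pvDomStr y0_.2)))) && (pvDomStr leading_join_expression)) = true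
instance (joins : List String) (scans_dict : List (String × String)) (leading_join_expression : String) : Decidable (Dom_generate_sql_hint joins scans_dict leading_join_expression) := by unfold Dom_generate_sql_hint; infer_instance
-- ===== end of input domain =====

-- B inlines the table extraction: parentheses are mapped to spaces and the string is
-- split on whitespace, replacing A's strip/outer-paren removal, dead bracket stack and
-- index loop; Python A and B both reverse `joins` IN PLACE — equivalence here is about
-- the return value (B performs the same mutation).


-- ===== PORT A =====
-- the `while i < len(expression)` loop of extract_tables_from_expression:
-- stack pushes at the Python list's end = head of the Lean list; the inner
-- token-reading `while` is the takeWhile/dropWhile of the same predicate.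
def pvScanA : List Char → List Char → List String → List String
  | [], _stack, acc => acc
  | c :: rest, stack, acc =>
    if _h1 : c = '(' then pvScanA rest ('(' :: stack) acc
    else if _h2 : c = ')' then
      pvScanA rest (if stack ≠ [] ∧ stack.head? = some '(' then stack.tail else stack) acc
    else if _h3 : PySem.Chars.isspace c then pvScanA rest stack acc
    else
      pvScanA ((c :: rest).dropWhile (fun d => !(PySem.Chars.isspace d) && d != '(' && d != ')'))
        stack
        (acc ++ [String.ofList ((c :: rest).takeWhile (fun d => !(PySem.Chars.isspace d) && d != '(' && d != ')'))])
termination_by cs => cs.length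
decreasing_by
  · simp
  · simp
  · simp
  · have : (fun d => !(PySem.Chars.isspace d) && d != '(' && d != ')') c = true := by
      simp [_h1, _h2, _h3]
    simp only [List.dropWhile_cons, this, if_true]
    exact Nat.lt_succ_of_le (List.length_dropWhile_le _ _)

def extract_tables_from_expression (expression : String) : List String :=
  let e1 := PySem.Str.strip expression
  let e2 := if PySem.Str.startswith e1 "(" && PySem.Str.endswith e1 ")" then
              PySem.Str.slice e1 (some 1) (some (-1))
            else e1
  pvScanA e2.toList [] []

def generate_sql_hint (joins : List String) (scans_dict : List (String × String)) (leading_join_expression : String) : String :=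
  -- joins.reverse() mutates the Python list in place; only the value is modelled here
  let joins' := joins.reverse
  let hint_parts := joins'
  let table_list := extract_tables_from_expression leading_join_expression
  let d : PySem.Dict String String := PySem.Dict.mk scans_dict
  let scans := table_list.filterMap (fun t => if d.contains t then d.get? t else none)
  let hint_parts := hint_parts ++ scans
  let hint_parts := if leading_join_expression = "" then hint_parts
                    else hint_parts ++ ["Leading" ++ leading_join_expression]
  "/*+ " ++ PySem.Str.join "\n" hint_parts ++ " */"

-- ===== PORT B =====
def generate_sql_hint_alt (joins : List String) (scans_dict : List (String × String)) (leading_join_expression : String) : String :=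
  let joins' := joins.reverse
  -- ''.join(' ' if c in '()' else c for c in leading_join_expression).split()
  let table_list := PySem.Str.split₀ (PySem.Str.join ""
    (leading_join_expression.toList.map (fun c => if c = '(' ∨ c = ')' then " " else String.ofList [c])))
  let d : PySem.Dict String String := PySem.Dict.mk scans_dict
  let parts := joins' ++ table_list.filterMap (fun t => if d.contains t then d.get? t else none)
  let parts := if leading_join_expression = "" then parts
               else parts ++ ["Leading" ++ leading_join_expression]
  "/*+ " ++ PySem.Str.join "\n" parts ++ " */"

-- ===== PRECONDITION & SPEC =====
def Spec_generate_sql_hint (joins : List String) (scans_dict : List (String × String)) (leading_join_expression : String) (out : String) : Prop := out = generate_sql_hint_alt joins scans_dict leading_join_expression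
instance (joins : List String) (scans_dict : List (String × String)) (leading_join_expression : String) (out : String) : Decidable (Spec_generate_sql_hint joins scans_dict leading_join_expression out) := by unfold Spec_generate_sql_hint; infer_instance

-- ===== CLAIM (what is proved, stated in full; the proofs are below) =====
def Claim_equal_generate_sql_hint : Prop := ∀ (joins : List String) (scans_dict : List (String × String)) (leading_join_expression : String), Dom_generate_sql_hint joins scans_dict leading_join_expression → Spec_generate_sql_hint joins scans_dict leading_join_expression (generate_sql_hint joins scans_dict leading_join_expression)

-- ===== LEMMAS AND PROOFS =====

-- common tokenizer specification: maximal runs of non-separator characters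
def tokSpec (sep : Char → Bool) : List Char → List (List Char)
  | [] => []
  | c :: rest =>
    if _h : sep c then tokSpec sep rest
    else ((c :: rest).takeWhile (fun d => !(sep d))) :: tokSpec sep ((c :: rest).dropWhile (fun d => !(sep d)))
termination_by cs => cs.length
decreasing_by
  · simp
  · have : (fun d => !(sep d)) c = true := by simp [_h]
    simp only [List.dropWhile_cons, this, if_true]
    exact Nat.lt_succ_of_le (List.length_dropWhile_le _ _)

def sepA (c : Char) : Bool := PySem.Chars.isspace c || c == '(' || c == ')'

def pvF (c : Char) : Char := if c = '(' ∨ c = ')' then ' ' else c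

theorem pred_eq : (fun d => !(PySem.Chars.isspace d) && d != '(' && d != ')') = (fun d => !(sepA d)) := by
  funext d; simp [sepA]; tauto

theorem pvDropWhile_head_false {α : Type} (p : α → Bool) :
    ∀ (l : List α) (c : α) (r : List α), l.dropWhile p = c :: r → p c = false := by
  intro l
  induction l with
  | nil => intro c r h; simp at h
  | cons a t ih =>
      intro c r h
      rw [List.dropWhile_cons] at h
      by_cases hp : p a
      · rw [if_pos hp] at h; exact ih c r h
      · rw [if_neg hp] at h
        cases h
        simpa using hp

theorem scanA_eq_tokSpec (cs : List Char) (stack : List Char) (acc : List String) :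
    pvScanA cs stack acc = acc ++ (tokSpec sepA cs).map String.ofList := by
  fun_induction pvScanA cs stack acc with
  | case1 => simp [tokSpec]
  | case2 rest stack acc ih => rw [ih, tokSpec]; simp [sepA]
  | case3 rest stack acc h ih =>
      rw [tokSpec]
      simp only [show sepA ')' = true from by decide, if_true]
      split at ih <;> split <;> simp_all
  | case4 c rest stack acc h1 h2 h3 ih =>
      rw [ih, tokSpec]; simp [sepA, h3]
  | case5 c rest stack acc h1 h2 h3 ih =>
      rw [ih, tokSpec]
      have hs : sepA c = false := by simp [sepA, h1, h2, h3]
      simp [hs, pred_eq]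

theorem split₀_go_spec (cs cur : List Char) (acc : List (List Char)) :
    PySem.Chars.split₀.go cs cur acc =
      acc.reverse ++ (if cur.isEmpty then tokSpec PySem.Chars.isspace cs
        else (cur.reverse ++ cs.takeWhile (fun d => !(PySem.Chars.isspace d))) ::
          tokSpec PySem.Chars.isspace (cs.dropWhile (fun d => !(PySem.Chars.isspace d)))) := by
  induction cs generalizing cur acc with
  | nil =>
      rw [PySem.Chars.split₀.go]
      cases cur <;> simp [tokSpec]
  | cons c rest ih =>
      rw [PySem.Chars.split₀.go]
      by_cases hsp : PySem.Chars.isspace c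
      · simp only [hsp, if_true]
        cases cur with
        | nil =>
            simp only [List.isEmpty_nil, if_true, ih, List.isEmpty_nil]
            rw [tokSpec]
            simp [hsp]
        | cons x xs =>
            simp only [List.isEmpty_cons, Bool.false_eq_true, if_false]
            rw [ih]
            simp [tokSpec, hsp]
      · simp only [hsp, Bool.false_eq_true, if_false]
        cases cur with
        | nil => rw [ih]; rw [tokSpec]; simp [hsp]
        | cons x xs => rw [ih]; simp [hsp]

theorem sepA_eq_isspace_pvF (c : Char) : sepA c = PySem.Chars.isspace (pvF c) := by
  by_cases h1 : c = '('
  · subst h1; decide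
  by_cases h2 : c = ')'
  · subst h2; decide
  · have e0 : pvF c = c := by simp [pvF, h1, h2]
    have e1 : (c == '(') = false := by simp [h1]
    have e2 : (c == ')') = false := by simp [h2]
    rw [e0]; simp [sepA, e1, e2]

theorem tokSpec_map_pvF (cs : List Char) :
    tokSpec PySem.Chars.isspace (cs.map pvF) = tokSpec sepA cs := by
  fun_induction tokSpec sepA cs with
  | case1 => simp [tokSpec]
  | case2 c rest h ih =>
      rw [List.map_cons, tokSpec]
      simp [← sepA_eq_isspace_pvF, h, ih]
  | case3 c rest h ih =>
      rw [List.map_cons, tokSpec]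
      have hq : (fun d => !PySem.Chars.isspace d) ∘ pvF = (fun d => !(sepA d)) := by
        funext d; simp [sepA_eq_isspace_pvF]
      have htw : (List.takeWhile (fun d => !PySem.Chars.isspace d) ((c :: rest).map pvF))
          = ((c :: rest).takeWhile (fun d => !(sepA d))).map pvF := by
        rw [List.takeWhile_map, hq]
      have hdw : (List.dropWhile (fun d => !PySem.Chars.isspace d) ((c :: rest).map pvF))
          = ((c :: rest).dropWhile (fun d => !(sepA d))).map pvF := by
        rw [List.dropWhile_map, hq]
      have hid : ((c :: rest).takeWhile (fun d => !(sepA d))).map pvF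
          = (c :: rest).takeWhile (fun d => !(sepA d)) := by
        conv_rhs => rw [← List.map_id (List.takeWhile (fun d => !(sepA d)) (c :: rest))]
        apply List.map_congr_left
        intro a ha
        have hb := List.mem_takeWhile_imp ha
        have hs : sepA a = false := by simpa using hb
        have hy : ¬ a = '(' := by intro hh; subst hh; simp [sepA] at hs
        have hz : ¬ a = ')' := by intro hh; subst hh; simp [sepA] at hs
        simp [pvF, hy, hz]
      rw [show PySem.Chars.isspace (pvF c) = sepA c from (sepA_eq_isspace_pvF c).symm]
      simp only [h, Bool.false_eq_true, if_false]
      rw [show (pvF c :: List.map pvF rest) = List.map pvF (c :: rest) from rfl]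
      rw [htw, hdw, hid, ih]
      conv_rhs => rw [tokSpec.eq_def]
      rw [List.takeWhile_cons_of_pos (by simp [h]), List.dropWhile_cons_of_pos (by simp [h])]
      rw [dif_neg not_false]
      simp only [List.cons.injEq, true_and]
      cases hD : List.dropWhile (fun d => !(sepA d)) rest with
      | nil => simp [tokSpec]
      | cons c' rest' =>
          have hp : sepA c' = true := by
            have := pvDropWhile_head_false (fun d => !(sepA d)) rest c' rest' hD
            simpa using this
          rw [tokSpec]

theorem tokSpec_all_sep (sep : Char → Bool) (ws : List Char) (h : ws.all sep) :
    tokSpec sep ws = [] := by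
  induction ws with
  | nil => rw [tokSpec]
  | cons c t ih =>
      simp at h
      rw [tokSpec]
      simp [h.1, ih (by simp; exact h.2)]

theorem tokSpec_append_sep (sep : Char → Bool) (ws : List Char) (h : ws.all sep) :
    ∀ (cs : List Char), tokSpec sep (cs ++ ws) = tokSpec sep cs := by
  intro cs
  induction hn : cs.length using Nat.strong_induction_on generalizing cs with
  | _ n ihn =>
  subst hn
  cases cs with
  | nil => simp [tokSpec, tokSpec_all_sep sep ws h]
  | cons c rest =>
      by_cases hc : sep c
      · rw [List.cons_append, tokSpec, tokSpec]
        simp only [hc, if_true]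
        exact ihn rest.length (by simp) rest rfl
      · rw [List.cons_append, tokSpec, tokSpec]
        rw [dif_neg hc, dif_neg hc]
        rw [List.takeWhile_cons_of_pos (by simp [hc]), List.takeWhile_cons_of_pos (by simp [hc]),
            List.dropWhile_cons_of_pos (by simp [hc]), List.dropWhile_cons_of_pos (by simp [hc])]
        simp only [List.cons.injEq, true_and]
        cases hD : List.dropWhile (fun d => !(sep d)) rest with
        | nil =>
            -- all of c::rest is non-sep: takeWhile = whole, append-side takeWhile absorbs nothing
            have hall : rest.takeWhile (fun d => !(sep d)) = rest := by
              have := List.takeWhile_append_dropWhile (p := fun d => !(sep d)) (l := rest)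
              rw [hD, List.append_nil] at this; exact this
            have hallP : ∀ a ∈ rest, (fun d => !(sep d)) a = true := by
              intro a ha; rw [← hall] at ha
              exact List.mem_takeWhile_imp (p := fun d => !(sep d)) ha
            have hwsT : ws.takeWhile (fun d => !(sep d)) = [] := by
              cases ws with
              | nil => rfl
              | cons w wt =>
                  simp at h
                  rw [List.takeWhile_cons_of_neg]; simp [h.1]
            have hwsD : ws.dropWhile (fun d => !(sep d)) = ws := by
              cases ws with
              | nil => rfl
              | cons w wt =>
                  simp at h
                  rw [List.dropWhile_cons_of_neg]; simp [h.1]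
            rw [List.takeWhile_append_of_pos hallP, List.dropWhile_append_of_pos hallP, hwsT,
              List.append_nil, hall, hwsD, tokSpec_all_sep sep ws h]
            exact ⟨rfl, by rw [tokSpec]⟩
            
        | cons d' r' =>
            have htw2 : (rest ++ ws).takeWhile (fun d => !(sep d)) = rest.takeWhile (fun d => !(sep d)) := by
              rw [List.takeWhile_append]
              split
              · next hh =>
                  exfalso
                  have h2 := List.takeWhile_append_dropWhile (p := fun d => !(sep d)) (l := rest)
                  have hl := congrArg List.length h2
                  rw [hD] at hl
                  simp at hl
                  omega
              · rfl
            have hdw2 : (rest ++ ws).dropWhile (fun d => !(sep d)) = rest.dropWhile (fun d => !(sep d)) ++ ws := by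
              rw [List.dropWhile_append]
              split
              · next hh => rw [hD] at hh; cases hh
              · rfl
            have hp : sep d' = true := by
              have := pvDropWhile_head_false (fun d => !(sep d)) rest d' r' hD
              simpa using this
            rw [htw2, hdw2, hD, List.cons_append]
            refine ⟨rfl, ?_⟩
            rw [tokSpec, tokSpec]
            rw [dif_pos hp, dif_pos hp]
            refine ihn r'.length ?_ r' rfl
            have hlen := List.length_dropWhile_le (fun d => !(sep d)) rest
            rw [hD] at hlen
            simp only [List.length_cons] at hlen ⊢
            omega

theorem tokSpec_lstrip (cs : List Char) :
    tokSpec sepA (cs.dropWhile PySem.Chars.isspace) = tokSpec sepA cs := by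
  induction cs with
  | nil => rfl
  | cons c t ih =>
      by_cases hc : PySem.Chars.isspace c
      · rw [List.dropWhile_cons_of_pos hc, ih, tokSpec]
        simp [sepA, hc]
      · rw [List.dropWhile_cons_of_neg hc]

theorem tokSpec_strip (cs : List Char) :
    tokSpec sepA (PySem.Chars.strip cs) = tokSpec sepA cs := by
  unfold PySem.Chars.strip PySem.Chars.rstrip PySem.Chars.lstrip
  set l := cs.dropWhile PySem.Chars.isspace with hl
  have hsplit : l = (l.reverse.dropWhile PySem.Chars.isspace).reverse
      ++ (l.reverse.takeWhile PySem.Chars.isspace).reverse := by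
    have h2 := congrArg List.reverse
      (List.takeWhile_append_dropWhile (p := PySem.Chars.isspace) (l := l.reverse))
    rw [List.reverse_append, List.reverse_reverse] at h2
    exact h2.symm
  have hws : ((l.reverse.takeWhile PySem.Chars.isspace).reverse).all sepA = true := by
    simp only [List.all_reverse]
    rw [List.all_eq_true]
    intro a ha
    have := List.mem_takeWhile_imp ha
    simp [sepA, this]
  calc tokSpec sepA (l.reverse.dropWhile PySem.Chars.isspace).reverse
      = tokSpec sepA ((l.reverse.dropWhile PySem.Chars.isspace).reverse
          ++ (l.reverse.takeWhile PySem.Chars.isspace).reverse) := by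
        rw [tokSpec_append_sep sepA _ hws]
    _ = tokSpec sepA l := by rw [← hsplit]
    _ = tokSpec sepA cs := tokSpec_lstrip cs

theorem slice_one_neg_one {α : Type} (a b : α) (mid : List α) :
    PySem.List.slice (a :: mid ++ [b]) (some 1) (some (-1)) = mid := by
  simp only [PySem.List.slice, PySem.List.clampIdx]
  norm_num
  rw [if_neg (by omega)]
  simp only [Nat.add_sub_cancel]
  simp

theorem extract_eq (s : String) :
    extract_tables_from_expression s = (tokSpec sepA s.toList).map String.ofList := by
  unfold extract_tables_from_expression
  rw [scanA_eq_tokSpec]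
  simp only [List.nil_append]
  by_cases hse : (PySem.Str.startswith (PySem.Str.strip s) "(" && PySem.Str.endswith (PySem.Str.strip s) ")") = true
  · rw [if_pos hse]
    simp only [Bool.and_eq_true] at hse
    have hpre : ['('] <+: (PySem.Str.strip s).toList := by
      have := hse.1
      rw [PySem.Str.startswith] at this
      exact (PySem.Chars.startswith_iff _ _).mp (by simpa using this)
    have hsuf : [')'] <:+ (PySem.Str.strip s).toList := by
      have := hse.2
      rw [PySem.Str.endswith] at this
      exact (PySem.Chars.endswith_iff _ _).mp (by simpa using this)
    obtain ⟨T, hT⟩ := hpre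
    replace hT := hT.symm
    have hTne : T ≠ [] := by
      intro h0
      rw [h0] at hT
      obtain ⟨pre, hs2⟩ := hsuf
      rw [hT] at hs2
      cases pre with
      | nil => simp at hs2
      | cons x xs => simp at hs2
    have hlast : T.getLast? = some ')' := by
      obtain ⟨pre, hs2⟩ := hsuf
      have h1 : (PySem.Str.strip s).toList.getLast? = some ')' := by
        rw [← hs2]
        rw [List.getLast?_append]
        rfl
      rw [hT] at h1
      rw [List.getLast?_append] at h1
      cases hTl : T.getLast? with
      | none => rw [List.getLast?_eq_none_iff] at hTl; exact absurd hTl hTne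
      | some a => rw [hTl] at h1; simpa using h1
    have hmid : (PySem.Str.strip s).toList = '(' :: T.dropLast ++ [')'] := by
      rw [hT]
      have := List.dropLast_append_getLast? _ hlast
      rw [← this]
      simp
    have hslice : (PySem.Str.slice (PySem.Str.strip s) (some 1) (some (-1))).toList = T.dropLast := by
      rw [PySem.Str.toList_slice, PySem.Chars.slice_eq_listSlice, hmid]
      exact slice_one_neg_one '(' ')' T.dropLast
    rw [hslice]
    refine congrArg (List.map String.ofList) ?_
    calc tokSpec sepA T.dropLast
        = tokSpec sepA (T.dropLast ++ [')']) := by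
          rw [tokSpec_append_sep sepA [')'] (by decide)]
      _ = tokSpec sepA ('(' :: (T.dropLast ++ [')'])) := by
          conv_rhs => rw [tokSpec]
          simp [show sepA '(' = true from by decide]
      _ = tokSpec sepA (PySem.Str.strip s).toList := by rw [hmid]; simp
      _ = tokSpec sepA s.toList := by
          rw [PySem.Str.toList_strip, tokSpec_strip]
  · rw [if_neg hse]
    congr 1
    rw [PySem.Str.toList_strip, tokSpec_strip]

theorem alt_tables_eq (s : String) :
    PySem.Str.split₀ (PySem.Str.join ""
      (s.toList.map (fun c => if c = '(' ∨ c = ')' then " " else String.ofList [c]))) =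
    (tokSpec sepA s.toList).map String.ofList := by
  have hjoin : (PySem.Str.join ""
      (s.toList.map (fun c => if c = '(' ∨ c = ')' then " " else String.ofList [c]))).toList
      = s.toList.map pvF := by
    rw [PySem.Str.join]
    have h1 : ((s.toList.map (fun c => if c = '(' ∨ c = ')' then " " else String.ofList [c])).map
        String.toList) = (s.toList.map pvF).map (fun c => [c]) := by
      rw [List.map_map, List.map_map]
      apply List.map_congr_left
      intro a _
      by_cases h : a = '(' ∨ a = ')'
      · simp [h, pvF]
      · simp [h, pvF]
    simp only [h1]
    rw [show ("" : String).toList = [] from rfl]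
    rw [PySem.Chars.join_nil_singletons]
    simp
  rw [PySem.Str.split₀, hjoin, PySem.Chars.split₀, split₀_go_spec]
  simp only [List.isEmpty_nil, if_true, List.reverse_nil, List.nil_append]
  rw [tokSpec_map_pvF]

-- ===== VERDICT (by name: the statement is the Claim_ definition above) =====
theorem generate_sql_hint_spec : Claim_equal_generate_sql_hint := by
  intro joins scans_dict lje _hdom
  unfold Spec_generate_sql_hint generate_sql_hint generate_sql_hint_alt
  rw [extract_eq, alt_tables_eq]
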